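-- pv_equiv track=rewrite | github.com/callmelazarus/Python-Practice-Problems | problems/problem_046.py | make_sentences
-- ===== SOURCE A (Python) =====
-- def make_sentences(subjects, verbs, objects):
--     total_string = []
--     for subject in subjects:
--         for verb in verbs:
--             for thing in objects:
--                 string = subject + " " + verb + " " + thing
--                 total_string.append(string)
--     return total_string
-- ===== SOURCE B (Python) =====
-- def make_sentences(subjects, verbs, objects):
--     nv, no = len(verbs), len(objects)
--     out = []
--     for k in range(len(subjects) * nv * no):
--         i, r = divmod(k, nv * no)
--         j, l = divmod(r, no)
--         out.append(subjects[i] + " " + verbs[j] + " " + objects[l])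
--     return out
-- ===== Notes on version B (the rewrite author's own statement) =====
-- stated objective: alternative
-- what changed: Replaces the three nested loops by a single flat loop over range(len(S)*len(V)*len(O)) that decodes each flat index k into the triple (i,j,l) with divmod and indexes the three lists directly.
import Mathlib
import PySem

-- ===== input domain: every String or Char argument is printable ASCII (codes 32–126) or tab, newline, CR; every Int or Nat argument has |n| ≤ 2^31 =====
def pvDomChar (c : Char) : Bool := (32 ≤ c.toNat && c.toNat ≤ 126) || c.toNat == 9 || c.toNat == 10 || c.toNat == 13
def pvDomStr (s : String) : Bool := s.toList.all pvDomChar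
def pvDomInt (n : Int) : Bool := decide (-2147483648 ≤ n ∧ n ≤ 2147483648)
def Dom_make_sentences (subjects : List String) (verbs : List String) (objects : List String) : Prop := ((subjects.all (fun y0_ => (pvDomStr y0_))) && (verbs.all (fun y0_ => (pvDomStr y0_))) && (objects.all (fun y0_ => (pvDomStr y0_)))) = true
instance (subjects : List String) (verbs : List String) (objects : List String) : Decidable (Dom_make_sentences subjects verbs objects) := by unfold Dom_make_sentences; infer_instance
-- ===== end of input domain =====

-- B replaces A's three nested loops by one flat loop over range(total) that decodes each index with divmod; same output (alternative decomposition, not claimed faster).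


-- ===== PORT A =====
def make_sentences (subjects : List String) (verbs : List String) (objects : List String) : List String :=
  subjects.foldl (fun total_string subject =>
    verbs.foldl (fun total_string verb =>
      objects.foldl (fun total_string thing =>
        total_string ++ [subject ++ " " ++ verb ++ " " ++ thing]) total_string) total_string) []

-- ===== PORT B =====
-- divmod on the nonnegative loop index is exact via PySem.Int.floordiv/mod (the divisor is nonzero whenever the loop body runs,
-- since an empty verbs/objects list makes the range empty); list indexing is always in range, ported with PySem.List.pyGetD
-- (the default is never used).
def make_sentences_alt (subjects : List String) (verbs : List String) (objects : List String) : List String :=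
  let nv : Int := (verbs.length : Int)
  let no_ : Int := (objects.length : Int)
  (PySem.List.pyRange 0 ((subjects.length : Int) * nv * no_) 1).foldl (fun out k =>
    let i := PySem.Int.floordiv k (nv * no_)
    let r := PySem.Int.mod k (nv * no_)
    let j := PySem.Int.floordiv r no_
    let l := PySem.Int.mod r no_
    out ++ [(PySem.List.pyGetD subjects i "") ++ " " ++ (PySem.List.pyGetD verbs j "") ++ " " ++ (PySem.List.pyGetD objects l "")]) []

-- ===== PRECONDITION & SPEC =====
def Spec_make_sentences (subjects : List String) (verbs : List String) (objects : List String) (out : List String) : Prop := out = make_sentences_alt subjects verbs objects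
instance (subjects : List String) (verbs : List String) (objects : List String) (out : List String) : Decidable (Spec_make_sentences subjects verbs objects out) := by unfold Spec_make_sentences; infer_instance

-- ===== CLAIM (what is proved, stated in full; the proofs are below) =====
def Claim_equal_make_sentences : Prop := ∀ (subjects : List String) (verbs : List String) (objects : List String), Dom_make_sentences subjects verbs objects → Spec_make_sentences subjects verbs objects (make_sentences subjects verbs objects)

-- ===== LEMMAS AND PROOFS =====

-- A range over a product splits into a double loop.
theorem range_mul_map {α : Type} (a b : Nat) (g : Nat → α) :
    (List.range (a * b)).map g
      = (List.range a).flatMap (fun i => (List.range b).map (fun j => g (i * b + j))) := by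
  induction a with
  | zero => simp
  | succ a ih =>
    rw [Nat.succ_mul, List.range_add, List.map_append, ih, List.range_succ, List.flatMap_append]
    simp [Nat.mul_comm]

-- A flatMap whose body reads the list only through indexing collapses to a flatMap over the list.
theorem flatMap_range_getD {α β : Type} [Inhabited α] (xs : List α) (d : α) (F : α → List β) :
    (List.range xs.length).flatMap (fun i => F (xs.getD i d)) = xs.flatMap F := by
  induction xs with
  | nil => simp
  | cons x t ih =>
    rw [List.length_cons, List.range_succ_eq_map, List.flatMap_cons, List.flatMap_map]
    simp only [List.getD_cons_zero, List.getD_cons_succ]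
    rw [List.flatMap_cons, ih]

-- Map twin of flatMap_range_getD.
theorem map_range_getD {α β : Type} [Inhabited α] (xs : List α) (d : α) (f : α → β) :
    (List.range xs.length).map (fun i => f (xs.getD i d)) = xs.map f := by
  induction xs with
  | nil => simp
  | cons x t ih =>
    rw [List.length_cons, List.range_succ_eq_map, List.map_cons, List.map_map]
    simp only [Function.comp_def, List.getD_cons_zero, List.getD_cons_succ]
    rw [List.map_cons, ih]

-- divmod decoding of the flat index i*(|V|*|O|) + (j*|O| + l) recovers (i, j, l).
theorem decode_eq (S V O : List String) (i j l : Nat) (hj : j < V.length) (hl : l < O.length) :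
    PySem.List.pyGetD S (PySem.Int.floordiv ((i * (V.length * O.length) + (j * O.length + l) : Nat) : Int) ((V.length : Int) * (O.length : Int))) ""
        ++ " " ++ PySem.List.pyGetD V (PySem.Int.floordiv (PySem.Int.mod ((i * (V.length * O.length) + (j * O.length + l) : Nat) : Int) ((V.length : Int) * (O.length : Int))) (O.length : Int)) ""
        ++ " " ++ PySem.List.pyGetD O (PySem.Int.mod (PySem.Int.mod ((i * (V.length * O.length) + (j * O.length + l) : Nat) : Int) ((V.length : Int) * (O.length : Int))) (O.length : Int)) ""
    = S.getD i "" ++ " " ++ V.getD j "" ++ " " ++ O.getD l "" := by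
  have hc : ((V.length : Int) * (O.length : Int)) = ((V.length * O.length : Nat) : Int) := by push_cast; ring
  have hcpos : 0 < V.length * O.length := Nat.mul_pos (by omega) (by omega)
  have hr : j * O.length + l < V.length * O.length := by
    calc j * O.length + l < j * O.length + O.length := by omega
      _ = (j + 1) * O.length := by ring
      _ ≤ V.length * O.length := Nat.mul_le_mul_right _ (by omega)
  have h1 : (i * (V.length * O.length) + (j * O.length + l)) / (V.length * O.length) = i := by
    rw [Nat.mul_comm i, Nat.mul_add_div hcpos, Nat.div_eq_of_lt hr, Nat.add_zero]
  have h2 : (i * (V.length * O.length) + (j * O.length + l)) % (V.length * O.length) = j * O.length + l := by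
    rw [Nat.mul_comm i, Nat.mul_add_mod, Nat.mod_eq_of_lt hr]
  have h3 : (j * O.length + l) / O.length = j := by
    rw [Nat.mul_comm j, Nat.mul_add_div (by omega), Nat.div_eq_of_lt hl, Nat.add_zero]
  have h4 : (j * O.length + l) % O.length = l := by
    rw [Nat.mul_comm j, Nat.mul_add_mod, Nat.mod_eq_of_lt hl]
  rw [hc, PySem.Int.floordiv_natCast, PySem.Int.mod_natCast, h1, h2,
    PySem.Int.floordiv_natCast, PySem.Int.mod_natCast, h3, h4,
    PySem.List.pyGetD_natCast, PySem.List.pyGetD_natCast, PySem.List.pyGetD_natCast]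

-- ===== VERDICT (by name: the statement is the Claim_ definition above) =====
theorem make_sentences_spec : Claim_equal_make_sentences := by
  intro S V O _
  unfold Spec_make_sentences make_sentences make_sentences_alt
  simp only [PySem.List.foldl_append_singleton_eq_map, PySem.List.foldl_append_eq_flatMap,
    List.nil_append]
  have htot : ((S.length : Int) * (V.length : Int) * (O.length : Int))
      = ((S.length * (V.length * O.length) : Nat) : Int) := by push_cast; ring
  rw [htot, PySem.List.pyRange_zero_natCast, List.map_map]
  rw [range_mul_map, ← flatMap_range_getD S ""]
  apply List.flatMap_congr
  intro i hi
  rw [List.mem_range] at hi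
  rw [range_mul_map, ← flatMap_range_getD V ""]
  apply List.flatMap_congr
  intro j hj
  rw [List.mem_range] at hj
  rw [← map_range_getD O ""]
  apply List.map_congr_left
  intro l hl
  rw [List.mem_range] at hl
  simp only [Function.comp]
  exact (decode_eq S V O i j l hj hl).symm
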